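-- pv_equiv track=rewrite | github.com/end0tknr/SpringVue | src/main/python/lib/service/mlit_seisanryokuchi.py | __divide_rows
-- ===== SOURCE A (Python) =====
-- def __divide_rows(org_rows, chunk_size, atri_keys):
--     i = 0
--     chunk = []
--     ret_rows = []
--     for org_row in org_rows:
--         new_tuple = ()
--         for atri_key in atri_keys:
--             new_tuple += (org_row[atri_key],)
--         chunk.append( new_tuple )
--
--         if len(chunk) >= chunk_size:
--             ret_rows.append(chunk)
--             chunk = []
--         i += 1
--
--     if len(chunk) > 0:
--         ret_rows.append(chunk)
--
--     return ret_rows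
-- ===== SOURCE B (Python) =====
-- def __divide_rows(org_rows, chunk_size, atri_keys):
--     projected = [tuple(row[k] for k in atri_keys) for row in org_rows]
--     step = chunk_size if chunk_size >= 1 else 1
--     return [projected[i:i + step] for i in range(0, len(projected), step)]
-- ===== Notes on version B (the rewrite author's own statement) =====
-- stated objective: simpler
-- what changed: Replaces the running chunk/counter accumulator with two passes: project every row first, then cut the projected list into chunks by slicing at range(0, n, step), clamping a non-positive chunk_size to step 1 (which yields A's singleton chunks).
import Mathlib
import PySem

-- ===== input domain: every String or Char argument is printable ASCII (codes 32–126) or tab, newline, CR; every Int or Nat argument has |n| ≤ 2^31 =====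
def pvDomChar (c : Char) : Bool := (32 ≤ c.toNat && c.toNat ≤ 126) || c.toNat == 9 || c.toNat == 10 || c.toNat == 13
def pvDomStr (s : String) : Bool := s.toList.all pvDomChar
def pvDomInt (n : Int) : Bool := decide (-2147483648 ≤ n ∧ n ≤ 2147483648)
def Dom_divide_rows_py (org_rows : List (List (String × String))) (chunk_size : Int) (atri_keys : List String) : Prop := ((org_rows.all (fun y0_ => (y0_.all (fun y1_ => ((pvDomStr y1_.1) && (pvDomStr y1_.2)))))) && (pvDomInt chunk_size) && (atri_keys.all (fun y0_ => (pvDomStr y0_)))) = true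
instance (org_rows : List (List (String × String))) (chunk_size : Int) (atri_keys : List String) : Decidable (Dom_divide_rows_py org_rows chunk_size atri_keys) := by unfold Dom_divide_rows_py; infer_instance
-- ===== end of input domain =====

-- B projects all rows in one pass, then slices the projected list into chunks of
-- step = max(chunk_size, 1) (simpler decomposition; no running chunk/counter).


-- ===== PORT A =====
-- literal transliteration of A: running chunk + result accumulator; org_row[k] is a
-- dict lookup (getD with dummy default ""; Pre_ guarantees the key is present).
def divide_rows_py (org_rows : List (List (String × String))) (chunk_size : Int) (atri_keys : List String) : List (List (List String)) :=
  let st := org_rows.foldl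
    (fun (st : List (List String) × List (List (List String))) org_row =>
      let new_tuple := atri_keys.foldl
        (fun t atri_key => t ++ [PySem.Dict.getD (PySem.Dict.ofList org_row) atri_key ""]) []
      let chunk := st.1 ++ [new_tuple]
      if chunk_size ≤ (chunk.length : Int) then ([], st.2 ++ [chunk]) else (chunk, st.2))
    ([], [])
  if st.1.length > 0 then st.2 ++ [st.1] else st.2

-- ===== PORT B =====
-- literal transliteration of B: projection pass, then range/slice chunking.
def divide_rows_py_alt (org_rows : List (List (String × String))) (chunk_size : Int) (atri_keys : List String) : List (List (List String)) :=
  let projected := org_rows.map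
    (fun row => atri_keys.map (fun k => PySem.Dict.getD (PySem.Dict.ofList row) k ""))
  let step : Int := if 1 ≤ chunk_size then chunk_size else 1
  (PySem.List.pyRange 0 (projected.length : Int) step).map
    (fun i => PySem.List.slice projected (some i) (some (i + step)))

-- ===== PRECONDITION & SPEC =====
-- Pre_ excludes exactly the inputs where Python A raises KeyError: some row lacking
-- one of atri_keys (Python B raises there too).
def Pre_divide_rows_py (org_rows : List (List (String × String))) (chunk_size : Int) (atri_keys : List String) : Prop :=
  ∀ row ∈ org_rows, ∀ k ∈ atri_keys, (row.map Prod.fst).contains k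
instance (org_rows : List (List (String × String))) (chunk_size : Int) (atri_keys : List String) : Decidable (Pre_divide_rows_py org_rows chunk_size atri_keys) := by unfold Pre_divide_rows_py; infer_instance

def pvWitness_divide_rows_py : (List (List (String × String))) × Int × List String :=
  ([[("a", "1"), ("b", "2")], [("a", "3"), ("b", "4")], [("a", "5"), ("b", "6")]], 2, ["a", "b"])

def Spec_divide_rows_py (org_rows : List (List (String × String))) (chunk_size : Int) (atri_keys : List String) (out : List (List (List String))) : Prop := out = divide_rows_py_alt org_rows chunk_size atri_keys
instance (org_rows : List (List (String × String))) (chunk_size : Int) (atri_keys : List String) (out : List (List (List String))) : Decidable (Spec_divide_rows_py org_rows chunk_size atri_keys out) := by unfold Spec_divide_rows_py; infer_instance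

-- ===== CLAIM (what is proved, stated in full; the proofs are below) =====
def Claim_equal_divide_rows_py : Prop := ∀ (org_rows : List (List (String × String))) (chunk_size : Int) (atri_keys : List String), Dom_divide_rows_py org_rows chunk_size atri_keys → Pre_divide_rows_py org_rows chunk_size atri_keys → Spec_divide_rows_py org_rows chunk_size atri_keys (divide_rows_py org_rows chunk_size atri_keys)

-- ===== LEMMAS AND PROOFS =====

-- the common meaning of both programs: cut l into chunks of size m+1
def chunksRec {α : Type} (m : Nat) : List α → List (List α)
  | [] => []
  | x :: l => ((x :: l).take (m+1)) :: chunksRec m ((x :: l).drop (m+1))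
  termination_by l => l.length
  decreasing_by simp

theorem chunksRec_nil {α : Type} (m : Nat) : chunksRec (α := α) m [] = [] := by
  rw [chunksRec.eq_def]

theorem chunksRec_of_ne_nil {α : Type} (m : Nat) (l : List α) (h : l ≠ []) :
    chunksRec m l = l.take (m+1) :: chunksRec m (l.drop (m+1)) := by
  cases l with
  | nil => exact absurd rfl h
  | cons x t => rw [chunksRec.eq_def]

-- the chunk count (Nat ceiling division), unrolled once
theorem count_succ (m n : Nat) (hn : 1 ≤ n) :
    (n + m) / (m + 1) = ((n - (m + 1)) + m) / (m + 1) + 1 := by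
  by_cases h : n ≤ m + 1
  · have h0 : n - (m + 1) = 0 := by omega
    rw [h0, show (n + m) / (m + 1) = 1 from Nat.div_eq_of_lt_le (by omega) (by omega),
        show (0 + m) / (m + 1) = 0 from Nat.div_eq_of_lt (by omega)]
  · have he : n + m = ((n - (m + 1)) + m) + (m + 1) := by omega
    rw [he, Nat.add_div_right _ (by omega)]

-- A's loop over the unprojected list, started on a partial chunk c (|c| ≤ m) and an
-- accumulator r, then finalized, yields r followed by the (m+1)-chunks of c ++ l.map g.
theorem foldA_proj {α γ : Type} (cs : Int) (m : Nat) (g : α → γ)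
    (hm : ∀ n : Nat, 1 ≤ n → (cs ≤ (n : Int) ↔ m + 1 ≤ n)) :
    ∀ (l : List α) (c : List γ) (r : List (List γ)), c.length ≤ m →
      (if (List.foldl (fun (st : List γ × List (List γ)) x =>
              if cs ≤ ((st.1 ++ [g x]).length : Int) then ([], st.2 ++ [st.1 ++ [g x]])
              else (st.1 ++ [g x], st.2)) (c, r) l).1.length > 0
       then (List.foldl (fun (st : List γ × List (List γ)) x =>
              if cs ≤ ((st.1 ++ [g x]).length : Int) then ([], st.2 ++ [st.1 ++ [g x]])
              else (st.1 ++ [g x], st.2)) (c, r) l).2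
            ++ [(List.foldl (fun (st : List γ × List (List γ)) x =>
              if cs ≤ ((st.1 ++ [g x]).length : Int) then ([], st.2 ++ [st.1 ++ [g x]])
              else (st.1 ++ [g x], st.2)) (c, r) l).1]
       else (List.foldl (fun (st : List γ × List (List γ)) x =>
              if cs ≤ ((st.1 ++ [g x]).length : Int) then ([], st.2 ++ [st.1 ++ [g x]])
              else (st.1 ++ [g x], st.2)) (c, r) l).2)
      = r ++ chunksRec m (c ++ l.map g) := by
  intro l
  induction l with
  | nil =>
    intro c r hc
    cases c with
    | nil => simp [chunksRec_nil]
    | cons y ys =>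
      simp only [List.foldl_nil, List.map_nil, List.append_nil]
      rw [chunksRec_of_ne_nil m _ (by simp)]
      rw [List.take_of_length_le (Nat.le_succ_of_le hc),
          List.drop_eq_nil_of_le (Nat.le_succ_of_le hc)]
      simp [chunksRec_nil]
  | cons x l ih =>
    intro c r hc
    simp only [List.foldl_cons]
    by_cases h : m + 1 ≤ (c ++ [g x]).length
    · have hcond : cs ≤ ((c ++ [g x]).length : Int) := by rw [hm _ (by simp)]; exact h
      rw [if_pos hcond, ih [] (r ++ [c ++ [g x]]) (Nat.zero_le m)]
      have hlen : (c ++ [g x]).length = m + 1 := by simp at h ⊢; omega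
      rw [chunksRec_of_ne_nil m (c ++ (x :: l).map g) (by simp)]
      have hassoc : c ++ (x :: l).map g = (c ++ [g x]) ++ l.map g := by simp
      rw [hassoc, ← hlen, List.take_left, List.drop_left]
      simp
    · have hcond : ¬ cs ≤ ((c ++ [g x]).length : Int) := by rw [hm _ (by simp)]; exact h
      rw [if_neg hcond, ih (c ++ [g x]) r (by simp at h ⊢; omega)]
      simp

-- B's pyRange/slice pass, in closed Nat form
theorem sliceB_closed {α : Type} (m : Nat) (l : List α) :
    (PySem.List.pyRange 0 (l.length : Int) ((m + 1 : Nat) : Int)).map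
        (fun i => PySem.List.slice l (some i) (some (i + ((m + 1 : Nat) : Int))))
      = (List.range ((l.length + m) / (m + 1))).map
          (fun k => (l.drop ((m+1) * k)).take (m+1)) := by
  have hpos : (0 : Int) < ((m + 1 : Nat) : Int) := by exact_mod_cast Nat.succ_pos m
  rw [PySem.List.pyRange_of_pos 0 _ hpos]
  have hcount : (if (0 : Int) < (l.length : Int)
      then (((l.length : Int) - 0 + ((m+1:Nat):Int) - 1) / ((m+1:Nat):Int)).toNat else 0)
      = (l.length + m) / (m + 1) := by
    cases l with
    | nil =>
      rw [if_neg (by simp)]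
      simp only [List.length_nil, Nat.zero_add]
      rw [Nat.div_eq_of_lt (by omega)]
    | cons x t =>
      rw [if_pos (by exact_mod_cast Nat.succ_pos t.length)]
      have e : ((x :: t).length : Int) - 0 + ((m+1:Nat):Int) - 1
          = (((x :: t).length + m : Nat) : Int) := by push_cast; ring
      rw [e, ← Int.natCast_div, Int.toNat_natCast]
  rw [hcount, List.map_map]
  apply List.map_congr_left
  intro k _
  simp only [Function.comp]
  have e1 : (0 : Int) + ((m+1:Nat):Int) * (k : Int) = (((m+1) * k : Nat) : Int) := by
    push_cast; ring
  rw [e1, PySem.List.slice_natCast_add]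

-- the closed form computes chunksRec
theorem closed_eq_chunksRec {α : Type} (m : Nat) :
    ∀ (n : Nat) (l : List α), l.length ≤ n →
      (List.range ((l.length + m) / (m + 1))).map
          (fun k => (l.drop ((m+1) * k)).take (m+1)) = chunksRec m l := by
  intro n
  induction n with
  | zero =>
    intro l hl
    cases l with
    | nil =>
      rw [chunksRec_nil]
      simp only [List.length_nil, Nat.zero_add]
      rw [Nat.div_eq_of_lt (by omega)]
      simp
    | cons x t => simp at hl
  | succ n ih =>
    intro l hl
    cases l with
    | nil =>
      rw [chunksRec_nil]
      simp only [List.length_nil, Nat.zero_add]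
      rw [Nat.div_eq_of_lt (by omega)]
      simp
    | cons x t =>
      rw [count_succ m (x :: t).length (by simp), List.range_succ_eq_map,
          List.map_cons, List.map_map]
      rw [chunksRec_of_ne_nil m _ (by simp)]
      simp only [List.length_cons, Nat.succ_sub_succ]
      congr 1
      have hlen2 : ((x :: t).drop (m+1)).length = t.length - m := by simp
      have hih := ih ((x :: t).drop (m+1)) (by simp at hl ⊢; omega)
      rw [hlen2] at hih
      refine Eq.trans ?_ hih
      apply List.map_congr_left
      intro k _
      simp only [Function.comp]
      have e : (m + 1) * Nat.succ k = (m + 1) + (m + 1) * k := by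
        simp [Nat.succ_eq_add_one]; ring
      rw [List.drop_drop, e]

-- ===== VERDICT (by name: the statement is the Claim_ definition above) =====
theorem divide_rows_py_spec : Claim_equal_divide_rows_py := by
  intro org_rows chunk_size atri_keys _ _
  show divide_rows_py org_rows chunk_size atri_keys
      = divide_rows_py_alt org_rows chunk_size atri_keys
  have hex : ∃ m : Nat, (if 1 ≤ chunk_size then chunk_size else 1) = ((m + 1 : Nat) : Int) := by
    by_cases h : 1 ≤ chunk_size
    · exact ⟨chunk_size.toNat - 1, by rw [if_pos h]; omega⟩
    · exact ⟨0, by rw [if_neg h]; norm_num⟩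
  obtain ⟨m, hstep⟩ := hex
  have hm : ∀ n : Nat, 1 ≤ n → (chunk_size ≤ (n : Int) ↔ m + 1 ≤ n) := by
    intro n hn
    by_cases h : 1 ≤ chunk_size
    · rw [if_pos h] at hstep; omega
    · rw [if_neg h] at hstep; omega
  unfold divide_rows_py divide_rows_py_alt
  simp only [PySem.List.foldl_append_singleton_eq_map, List.nil_append]
  rw [hstep]
  have h1 := foldA_proj chunk_size m
    (fun row => atri_keys.map (fun k => PySem.Dict.getD (PySem.Dict.ofList row) k ""))
    hm org_rows [] [] (Nat.zero_le m)
  have h2 := sliceB_closed m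
    (org_rows.map (fun row => atri_keys.map (fun k => PySem.Dict.getD (PySem.Dict.ofList row) k "")))
  have h3 := closed_eq_chunksRec m
    (org_rows.map (fun row => atri_keys.map (fun k => PySem.Dict.getD (PySem.Dict.ofList row) k ""))).length
    (org_rows.map (fun row => atri_keys.map (fun k => PySem.Dict.getD (PySem.Dict.ofList row) k "")))
    le_rfl
  exact h1.trans ((h2.trans h3).symm)
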